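-- pv_equiv track=rewrite | github.com/BrendanCoughlan/cryptopals | bitfiddle.py | _single_byte_hamming_distance
-- ===== SOURCE A (Python) =====
-- def _single_byte_hamming_distance(pair):
--     distance = 0
--     left, right = pair
--     if left >= 256 or right >= 256:
--         raise ValueError("Not a byte")
--     if left < 0 or right < 0:
--         raise ValueError("Not an (unsigned) byte")
--     for ii in range(8):
--         mask = 1 << ii
--         if (mask & left) != (mask & right):
--             distance += 1
--     return distance
-- ===== SOURCE B (Python) =====
-- def _single_byte_hamming_distance(pair):
--     left, right = pair
--     if left >= 256 or right >= 256:
--         raise ValueError("Not a byte")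
--     if left < 0 or right < 0:
--         raise ValueError("Not an (unsigned) byte")
--     x = left ^ right
--     distance = 0
--     while x:
--         x &= x - 1
--         distance += 1
--     return distance
-- ===== Notes on version B (the rewrite author's own statement) =====
-- stated objective: alternative
-- what changed: Replaces the fixed 8-iteration mask-and-compare loop with XOR followed by Kernighan's bit-clearing popcount (x &= x-1), iterating only over differing bits.
import Mathlib
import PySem

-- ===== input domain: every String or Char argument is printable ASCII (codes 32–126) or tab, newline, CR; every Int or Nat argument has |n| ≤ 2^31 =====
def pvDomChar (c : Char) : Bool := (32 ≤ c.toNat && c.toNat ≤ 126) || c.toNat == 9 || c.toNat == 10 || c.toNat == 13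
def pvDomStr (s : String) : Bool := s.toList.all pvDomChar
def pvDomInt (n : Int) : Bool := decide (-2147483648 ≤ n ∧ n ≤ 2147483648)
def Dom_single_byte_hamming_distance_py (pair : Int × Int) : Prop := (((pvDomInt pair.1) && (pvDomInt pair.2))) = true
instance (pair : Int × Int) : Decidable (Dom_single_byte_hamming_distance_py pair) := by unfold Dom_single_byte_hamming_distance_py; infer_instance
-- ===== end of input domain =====

-- B replaces the fixed 8-iteration mask loop with XOR + Kernighan's bit-clearing popcount (alternative decomposition, not claimed faster).


-- ===== PORT A =====
-- for ii in range(8): mask = 1 << ii; if (mask & left) != (mask & right): distance += 1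
-- mask = 1 << ii is computed in Nat and cast (ii ∈ [0,8), so exact); '&' on the
-- nonnegative ints admitted by Pre_ is Int.land, exact.
def single_byte_hamming_distance_py (pair : Int × Int) : Int :=
  let left := pair.1
  let right := pair.2
  -- the two 'raise ValueError' branches are excluded by Pre_; value there is arbitrary
  if left ≥ 256 ∨ right ≥ 256 then 0
  else if left < 0 ∨ right < 0 then 0
  else (List.range 8).foldl
    (fun distance ii =>
      let mask : Int := ((1 <<< ii : Nat) : Int)
      if (Int.land mask left) ≠ (Int.land mask right) then distance + 1 else distance) 0

-- ===== PORT B =====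
-- while x: x &= x - 1; distance += 1  — x is a nonnegative int after the guards,
-- so the loop runs on Nat (exact on the admitted domain).
-- fuel = initial x bounds the iteration count exactly (x strictly decreases each
-- step, so the fuel branch is never the one that returns); structural so it computes.
def kernighanLoop : Nat → Nat → Int → Int
  | 0, _, distance => distance
  | fuel + 1, x, distance =>
    if x = 0 then distance
    else kernighanLoop fuel (x &&& (x - 1)) (distance + 1)

def single_byte_hamming_distance_py_alt (pair : Int × Int) : Int :=
  let left := pair.1
  let right := pair.2
  if left ≥ 256 ∨ right ≥ 256 then 0
  else if left < 0 ∨ right < 0 then 0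
  else kernighanLoop (left.toNat ^^^ right.toNat) (left.toNat ^^^ right.toNat) 0

-- ===== PRECONDITION & SPEC =====
-- Pre_ excludes exactly the inputs on which A raises ValueError (either component
-- negative or ≥ 256).
def Pre_single_byte_hamming_distance_py (pair : Int × Int) : Prop :=
  0 ≤ pair.1 ∧ pair.1 < 256 ∧ 0 ≤ pair.2 ∧ pair.2 < 256
instance (pair : Int × Int) : Decidable (Pre_single_byte_hamming_distance_py pair) := by
  unfold Pre_single_byte_hamming_distance_py; infer_instance
def pvWitness_single_byte_hamming_distance_py : (Int × Int) := (37, 200)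

def Spec_single_byte_hamming_distance_py (pair : Int × Int) (out : Int) : Prop := out = single_byte_hamming_distance_py_alt pair
instance (pair : Int × Int) (out : Int) : Decidable (Spec_single_byte_hamming_distance_py pair out) := by unfold Spec_single_byte_hamming_distance_py; infer_instance

-- ===== CLAIM (what is proved, stated in full; the proofs are below) =====
def Claim_equal_single_byte_hamming_distance_py : Prop := ∀ (pair : Int × Int), Dom_single_byte_hamming_distance_py pair → Pre_single_byte_hamming_distance_py pair → Spec_single_byte_hamming_distance_py pair (single_byte_hamming_distance_py pair)

-- ===== LEMMAS AND PROOFS =====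
-- the common 8-bit counter both ports reduce to
def bitFold (x : Nat) : Int :=
  (List.range 8).foldl (fun d ii => if x.testBit ii then d + 1 else d) 0

lemma land_cast (m n : Nat) : Int.land (↑m) (↑n) = ↑(m &&& n) := rfl

lemma cond_iff (a b ii : Nat) :
    (Int.land ((1 <<< ii : Nat) : Int) (↑a) ≠ Int.land ((1 <<< ii : Nat) : Int) (↑b)) ↔
      (a ^^^ b).testBit ii = true := by
  rw [land_cast, land_cast, Ne, Int.natCast_inj, Nat.shiftLeft_eq, one_mul,
    Nat.two_pow_and, Nat.two_pow_and, Nat.testBit_xor]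
  have hp : 0 < 2 ^ ii := Nat.two_pow_pos ii
  cases ha : a.testBit ii <;> cases hb : b.testBit ii <;> (simp; try omega)

lemma A_eq (a b : Nat) (ha : a < 256) (hb : b < 256) :
    single_byte_hamming_distance_py ((a : Nat), (b : Nat)) = bitFold (a ^^^ b) := by
  unfold single_byte_hamming_distance_py bitFold
  rw [if_neg (by push_cast; omega), if_neg (by push_cast; omega)]
  have hf : (fun (distance : Int) (ii : Nat) =>
        let mask : Int := ((1 <<< ii : Nat) : Int)
        if (Int.land mask ↑a) ≠ (Int.land mask ↑b) then distance + 1 else distance) =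
      (fun (d : Int) (ii : Nat) => if (a ^^^ b).testBit ii then d + 1 else d) := by
    funext d ii
    simp only [cond_iff]
  rw [hf]

lemma B_eq (a b : Nat) (ha : a < 256) (hb : b < 256) :
    single_byte_hamming_distance_py_alt ((a : Nat), (b : Nat)) =
      kernighanLoop (a ^^^ b) (a ^^^ b) 0 := by
  unfold single_byte_hamming_distance_py_alt
  rw [if_neg (by push_cast; omega), if_neg (by push_cast; omega)]
  simp

-- the two counting strategies agree on every byte value (finite check)
set_option maxRecDepth 10000 in
lemma key : ∀ x : Fin 256, bitFold x = kernighanLoop x x 0 := by decide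

-- ===== VERDICT (by name: the statement is the Claim_ definition above) =====
theorem single_byte_hamming_distance_py_spec : Claim_equal_single_byte_hamming_distance_py := by
  intro pair _ hpre
  obtain ⟨l, r⟩ := pair
  obtain ⟨h1, h2, h3, h4⟩ := hpre
  have e1 : ((l.toNat : Nat) : Int) = l := Int.toNat_of_nonneg h1
  have e2 : ((r.toNat : Nat) : Int) = r := Int.toNat_of_nonneg h3
  have ha : l.toNat < 256 := by omega
  have hb : r.toNat < 256 := by omega
  have hx : l.toNat ^^^ r.toNat < 256 := Nat.xor_lt_two_pow (n := 8) ha hb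
  unfold Spec_single_byte_hamming_distance_py
  rw [← e1, ← e2, A_eq _ _ ha hb, B_eq _ _ ha hb]
  exact key ⟨l.toNat ^^^ r.toNat, hx⟩
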